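-- pv_equiv track=rewrite | github.com/haolunc/ARC-RL | reference_solutions/solutions/3bd67248.py | transform
-- ===== SOURCE A (Python) =====
-- def transform(grid):
--
--     h = len(grid)
--     if h == 0:
--         return []
--     w = len(grid[0])
--
--     out = [row[:] for row in grid]
--
--     for i in range(h - 1):
--         j = w - 1 - i
--         out[i][j] = 2
--
--     for j in range(1, w):
--         out[h - 1][j] = 4
--
--     return out
-- ===== SOURCE B (Python) =====
-- def transform(grid):
--     if not grid:
--         return []
--
--     def go(rows, d):
--         head, *rest = rows
--         if not rest:
--             return [head[:1] + [4] * (len(head) - 1)]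
--         if 0 <= d < len(head):
--             marked = head[:d] + [2] + head[d + 1:]
--         else:
--             marked = head[:]
--         return [marked] + go(rest, d - 1)
--
--     return go(grid, len(grid[0]) - 1)
-- ===== Notes on version B (the rewrite author's own statement) =====
-- stated objective: alternative
-- what changed: Instead of copying the whole grid and then destructively patching cells by index in two staged loops, B recurses over the rows carrying a descending diagonal cursor, rebuilds each marked row by slice concatenation (head[:d] + [2] + head[d+1:]), and emits the bottom row as head[:1] + [4]*(w-1); no in-place mutation or index arithmetic over the copy remains.
-- intended difference: On rectangular grids at least two rows taller than wide (h >= w+2, w >= 1), A's diagonal index w-1-i goes negative for rows i >= w and Python's negative-index wraparound marks the unintended cell (i, 2w-1-i) with 2; B leaves those rows unchanged (the anti-diagonal simply ends), which is the intended marking. — e.g. on transform([[0], [0], [0]]): A returns [[2], [2], [0]], B returns [[2], [0], [0]]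
-- outside the precondition, e.g. on transform([[1], [2, 3]]): A returns [[2], [2, 3]], B returns [[2], [2, 4]]
import Mathlib
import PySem

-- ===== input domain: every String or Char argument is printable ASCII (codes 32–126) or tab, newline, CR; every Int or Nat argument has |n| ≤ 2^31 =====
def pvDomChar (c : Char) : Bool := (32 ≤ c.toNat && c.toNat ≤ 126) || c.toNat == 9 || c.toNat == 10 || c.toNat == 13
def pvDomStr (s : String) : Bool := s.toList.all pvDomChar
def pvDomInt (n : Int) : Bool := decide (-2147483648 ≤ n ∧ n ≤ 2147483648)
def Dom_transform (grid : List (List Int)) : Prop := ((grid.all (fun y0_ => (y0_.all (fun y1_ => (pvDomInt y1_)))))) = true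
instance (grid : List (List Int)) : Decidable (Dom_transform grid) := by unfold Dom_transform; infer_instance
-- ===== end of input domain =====

-- B recurses over the rows with a descending diagonal cursor, rebuilding each marked row by slice
-- concatenation instead of copying the grid and destructively patching it in staged loops; alternative
-- decomposition, same cost.

-- ===== PORT A =====
def transform (grid : List (List Int)) : List (List Int) :=
  let h : Nat := grid.length
  if h = 0 then []
  else
    let w : Nat := (grid.headD []).length
    let out : List (List Int) := grid.map (fun row => PySem.List.slice row none none)
    let out := (PySem.List.pyRange 0 ((h : Int) - 1) 1).foldl
      (fun out i =>
        let j : Int := (w : Int) - 1 - i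
        PySem.List.pySetD out i (PySem.List.pySetD (PySem.List.pyGetD out i []) j 2)) out
    let out := (PySem.List.pyRange 1 (w : Int) 1).foldl
      (fun out j =>
        PySem.List.pySetD out ((h : Int) - 1)
          (PySem.List.pySetD (PySem.List.pyGetD out ((h : Int) - 1) []) j 4)) out
    out

-- ===== PORT B =====
-- go rows d: head, *rest = rows; bottom row when rest is empty, else slice-rebuild at cursor d
def transform_alt_go : List (List Int) → Int → List (List Int)
  | [], _ => []
  | [head], _ =>
      [PySem.List.slice head none (some 1) ++ List.replicate (head.length - 1) 4]
  | head :: b :: rest, d =>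
      (if 0 ≤ d ∧ d < (head.length : Int) then
        PySem.List.slice head none (some d) ++ [(2 : Int)] ++ PySem.List.slice head (some (d + 1)) none
      else PySem.List.slice head none none) :: transform_alt_go (b :: rest) (d - 1)

def transform_alt (grid : List (List Int)) : List (List Int) :=
  if grid.length = 0 then []
  else transform_alt_go grid (((grid.headD []).length : Int) - 1)

-- ===== PRECONDITION & SPEC =====
-- Pre_ excludes (a) non-rectangular grids — outside the task's natural domain: A indexes every row at
-- positions computed from row 0's width, so its result there is an accident of the other rows' lengths —
-- and (b) rectangular grids on which A raises IndexError (width 0 with at least 2 rows, or h > 2w+1,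
-- where the diagonal write lands below even Python's negative-index range).
def Pre_transform (grid : List (List Int)) : Prop :=
  grid = [] ∨
  ((∀ row ∈ grid, row.length = (grid.headD []).length) ∧
   (1 ≤ (grid.headD []).length ∨ grid.length = 1) ∧
   (grid.length : Int) ≤ 2 * ((grid.headD []).length : Int) + 1)
instance (grid : List (List Int)) : Decidable (Pre_transform grid) := by unfold Pre_transform; infer_instance
def pvWitness_transform : List (List Int) := [[1, 2], [3, 4]]

-- On rectangular grids at least two rows taller than wide (w ≥ 1, h ≥ w+2), A's diagonal index w-1-i is
-- negative for rows i ≥ w and Python's negative-index wraparound marks the unintended cell (i, 2w-1-i)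
-- with 2; B leaves those rows unchanged (the anti-diagonal simply ends), which is the intended marking.
def D_transform (grid : List (List Int)) : Prop :=
  grid ≠ [] ∧
  (∀ row ∈ grid, row.length = (grid.headD []).length) ∧
  1 ≤ (grid.headD []).length ∧
  (grid.headD []).length + 2 ≤ grid.length
instance (grid : List (List Int)) : Decidable (D_transform grid) := by unfold D_transform; infer_instance

def Spec_transform (grid : List (List Int)) (out : List (List Int)) : Prop :=
  ¬ D_transform grid → out = transform_alt grid
instance (grid : List (List Int)) (out : List (List Int)) : Decidable (Spec_transform grid out) := by unfold Spec_transform; infer_instance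

def pvDiffWitness_transform : List (List Int) := [[0], [0], [0]]
def pvDiffWitnessOut_transform : (List (List Int)) × (List (List Int)) :=
  ([[2], [2], [0]], [[2], [0], [0]])

-- ===== CLAIM (what is proved, stated in full; the proofs are below) =====
def Claim_unchanged_transform : Prop := ∀ (grid : List (List Int)), Dom_transform grid → Pre_transform grid → Spec_transform grid (transform grid)
def Claim_changed_transform : Prop := Dom_transform (pvDiffWitness_transform) ∧ Pre_transform (pvDiffWitness_transform) ∧ D_transform (pvDiffWitness_transform) ∧ transform (pvDiffWitness_transform) = pvDiffWitnessOut_transform.1 ∧ transform_alt (pvDiffWitness_transform) = pvDiffWitnessOut_transform.2 ∧ pvDiffWitnessOut_transform.1 ≠ pvDiffWitnessOut_transform.2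

-- ===== LEMMAS AND PROOFS =====

-- loop 1 of A: iteration i rewrites row i using only row i, so the fold maps over the first b rows
theorem rowloop (val : Int → List Int → List Int) :
    ∀ (b : Nat) (g : List (List Int)), b ≤ g.length →
    (PySem.List.pyRange 0 (b : Int) 1).foldl
      (fun out i => PySem.List.pySetD out i (val i (PySem.List.pyGetD out i []))) g
    = (List.range b).map (fun (k : Nat) => val (↑k) (g.getD k [])) ++ g.drop b := by
  intro b
  induction b with
  | zero => intro g _; simp [PySem.List.pyRange_one_eq_nil]
  | succ b ih =>
    intro g hb
    have hb' : b < g.length := by omega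
    rw [show ((b + 1 : Nat) : Int) = (b : Int) + 1 by push_cast; ring,
      PySem.List.pyRange_one_succ_right (by positivity), List.foldl_append, ih g (by omega)]
    have hlenP : ((List.range b).map (fun (k : Nat) => val (↑k) (g.getD k []))).length = b := by simp
    simp only [List.foldl_cons, List.foldl_nil, PySem.List.pySetD_natCast, PySem.List.pyGetD_natCast]
    rw [List.getD_eq_getElem?_getD, List.getElem?_append_right (by omega), hlenP]
    simp only [Nat.sub_self, List.getElem?_drop, Nat.add_zero, List.getElem?_eq_getElem hb',
      Option.getD_some, List.set_append, hlenP]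
    rw [List.drop_eq_getElem_cons hb', List.set_cons_zero, List.range_succ]
    simp [List.getElem?_eq_getElem hb']

-- loop 2 of A: every iteration rewrites the same row n
theorem samerow (n : Nat) (js : List Int) :
    ∀ (g : List (List Int)), n < g.length →
    js.foldl (fun out j => out.set n (PySem.List.pySetD (out.getD n []) j 4)) g
    = g.set n (js.foldl (fun row j => PySem.List.pySetD row j 4) (g.getD n [])) := by
  induction js with
  | nil =>
    intro g hn
    rw [List.getD_eq_getElem _ _ hn]
    simp [List.set_getElem_self]
  | cons j js ih =>
    intro g hn
    simp only [List.foldl_cons]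
    rw [ih _ (by simpa using hn)]
    have hs : n < (g.set n (PySem.List.pySetD (g.getD n []) j 4)).length := by simpa using hn
    rw [List.getD_eq_getElem _ _ hs, List.getElem_set_self (by simpa using hn), List.set_set]

-- the inner fold of loop 2 fills positions 1..c-1 of the row with 4
theorem rowfill (c : Nat) (row : List Int) (h1 : 1 ≤ c) (hc : c ≤ row.length) :
    (PySem.List.pyRange 1 (c : Int) 1).foldl (fun r j => PySem.List.pySetD r j 4) row
    = row.take 1 ++ List.replicate (c - 1) 4 ++ row.drop c := by
  induction c with
  | zero => omega
  | succ c ih =>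
    rcases Nat.lt_or_ge c 1 with h | h
    · obtain rfl : c = 0 := by omega
      cases row with
      | nil => simp at hc
      | cons a t => simp [PySem.List.pyRange_one_eq_nil]
    · have hc' : c < row.length := by omega
      rw [show ((c + 1 : Nat) : Int) = (c : Int) + 1 by push_cast; ring,
        PySem.List.pyRange_one_succ_right (by exact_mod_cast h), List.foldl_append,
        ih h (by omega)]
      simp only [List.foldl_cons, List.foldl_nil, PySem.List.pySetD_natCast, List.set_append]
      have hlen : (row.take 1).length = 1 := by simp; omega
      simp only [List.length_append, hlen, List.length_replicate]
      rw [show c - (1 + (c - 1)) = 0 by omega, List.drop_eq_getElem_cons hc', List.set_cons_zero,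
        show c + 1 - 1 = (c - 1) + 1 by omega, List.replicate_succ']
      simp
      intro h2
      omega

-- B's slice-rebuilt row equals set when the cursor lies inside the row
theorem brow_set (row : List Int) (d : Int) (h0 : 0 ≤ d) (h1 : d < (row.length : Int)) :
    PySem.List.slice row none (some d) ++ [(2 : Int)] ++ PySem.List.slice row (some (d + 1)) none
    = row.set d.toNat 2 := by
  rw [PySem.List.slice_to _ h0, PySem.List.slice_from _ (show (0:Int) ≤ d + 1 by omega),
    List.set_eq_take_append_cons_drop, if_pos (show d.toNat < row.length by omega),
    show (d + 1).toNat = d.toNat + 1 by omega]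
  simp

-- B's recursion characterized: a map over the first (n-1) row indices plus the bottom row
theorem go_eq : ∀ (rows : List (List Int)) (d : Int), rows ≠ [] →
    transform_alt_go rows d
    = (List.range (rows.length - 1)).map (fun (k : Nat) =>
        (fun (r : List Int) (e : Int) =>
          if 0 ≤ e ∧ e < (r.length : Int) then
            PySem.List.slice r none (some e) ++ [(2 : Int)] ++ PySem.List.slice r (some (e + 1)) none
          else PySem.List.slice r none none) (rows.getD k []) (d - k))
      ++ [PySem.List.slice (rows.getD (rows.length - 1) []) none (some 1)
          ++ List.replicate ((rows.getD (rows.length - 1) []).length - 1) 4] := by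
  intro rows
  induction rows with
  | nil => intro d h; exact absurd rfl h
  | cons head rest ih =>
    intro d _
    cases rest with
    | nil => simp [transform_alt_go]
    | cons b rest' =>
      rw [show transform_alt_go (head :: b :: rest') d
          = (if 0 ≤ d ∧ d < (head.length : Int) then
              PySem.List.slice head none (some d) ++ [(2 : Int)] ++ PySem.List.slice head (some (d + 1)) none
            else PySem.List.slice head none none) :: transform_alt_go (b :: rest') (d - 1) from rfl,
        ih (d - 1) (by simp)]
      rw [show (head :: b :: rest').length - 1 = ((b :: rest').length - 1) + 1 by simp,
        List.range_succ_eq_map, List.map_cons, List.map_map]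
      simp only [Nat.cast_zero, sub_zero, List.getD_cons_zero, List.cons_append]
      congr 2
      apply List.map_congr_left
      intro k _
      simp only [Function.comp_apply, List.getD_cons_succ]
      rw [show d - 1 - (k : Int) = d - ((k + 1 : Nat) : Int) by push_cast; ring]

-- the two ports agree on every rectangular grid with 1 ≤ w and 1 ≤ h ≤ w+1
theorem transform_eq_alt_of_rect (grid : List (List Int))
    (hrect : ∀ row ∈ grid, row.length = (grid.headD []).length)
    (hw : 1 ≤ (grid.headD []).length)
    (hh1 : 1 ≤ grid.length)
    (hh : grid.length ≤ (grid.headD []).length + 1) :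
    transform grid = transform_alt grid := by
  have hne : grid.length ≠ 0 := by omega
  unfold transform transform_alt
  simp only [if_neg hne]
  have hcast : (grid.length : Int) - 1 = ((grid.length - 1 : Nat) : Int) := by omega
  rw [hcast]
  have e0 : grid.map (fun row => PySem.List.slice row none none) = grid := by
    simp [PySem.List.slice_none_none]
  rw [e0]
  rw [rowloop (fun i row => PySem.List.pySetD row (((grid.headD []).length : Int) - 1 - i) 2)
    (grid.length - 1) grid (by omega)]
  simp only [PySem.List.pySetD_natCast, PySem.List.pyGetD_natCast]
  rw [samerow (grid.length - 1) _ _ (by simp; omega)]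
  have eget : ((List.range (grid.length - 1)).map
        (fun (k : Nat) => PySem.List.pySetD (grid.getD k []) (((grid.headD []).length : Int) - 1 - (k : Int)) 2)
        ++ grid.drop (grid.length - 1)).getD (grid.length - 1) []
      = grid.getD (grid.length - 1) [] := by
    rw [List.getD_eq_getElem?_getD, List.getElem?_append_right (by simp), List.getD_eq_getElem?_getD]
    simp
  rw [eget]
  have hmem : grid.getD (grid.length - 1) [] ∈ grid := by
    rw [List.getD_eq_getElem _ _ (by omega)]
    exact List.getElem_mem _
  have hlast : (grid.getD (grid.length - 1) []).length = (grid.headD []).length :=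
    hrect _ hmem
  have efill : (PySem.List.pyRange 1 ((grid.headD []).length : Int) 1).foldl
      (fun row j => PySem.List.pySetD row j 4) (grid.getD (grid.length - 1) [])
      = (grid.getD (grid.length - 1) []).take 1 ++ List.replicate ((grid.headD []).length - 1) 4 := by
    rw [rowfill (grid.headD []).length _ hw (le_of_eq hlast.symm)]
    rw [show (grid.getD (grid.length - 1) []).drop (grid.headD []).length = [] by
      rw [← hlast, List.drop_length]]
    simp
  rw [efill]
  rw [List.set_append, if_neg (by simp), show grid.length - 1 -
    ((List.range (grid.length - 1)).map (fun (k : Nat) =>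
      PySem.List.pySetD (grid.getD k []) (((grid.headD []).length : Int) - 1 - (k : Int)) 2)).length = 0
      by simp]
  rw [List.drop_eq_getElem_cons (show grid.length - 1 < grid.length by omega), List.set_cons_zero,
    show grid.drop (grid.length - 1 + 1) = [] by
      rw [show grid.length - 1 + 1 = grid.length by omega, List.drop_length]]
  -- B side
  rw [go_eq grid _ (by intro h; subst h; simp at hh1)]
  congr 1
  · apply List.map_congr_left
    intro k hk
    rw [List.mem_range] at hk
    have hkmem : grid.getD k [] ∈ grid := by
      rw [List.getD_eq_getElem _ _ (by omega)]
      exact List.getElem_mem _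
    have hrow : (grid.getD k []).length = (grid.headD []).length := hrect _ hkmem
    have hpos : (0 : Int) ≤ ((grid.headD []).length : Int) - 1 - (k : Int) := by omega
    have hlt : ((grid.headD []).length : Int) - 1 - (k : Int) < ((grid.getD k []).length : Int) := by
      rw [hrow]; omega
    simp only []
    rw [if_pos (And.intro hpos hlt), brow_set _ _ hpos hlt,
      PySem.List.pySetD_of_nonneg _ _ hpos]
  · rw [PySem.List.slice_to _ (show (0:Int) ≤ 1 by omega), hlast]
    norm_num

-- ===== VERDICT (by name: the statement is the Claim_ definition above) =====
theorem transform_spec : Claim_unchanged_transform := by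
  intro grid _ hpre
  unfold Spec_transform
  intro hnd
  rcases hpre with rfl | ⟨hrect, hw1, hh⟩
  · rfl
  · by_cases hw0 : (grid.headD []).length = 0
    · have h1 : grid.length = 1 := by
        rcases hw1 with h | h
        · omega
        · exact h
      obtain ⟨x, rfl⟩ : ∃ x, grid = [x] := by
        cases grid with
        | nil => simp at h1
        | cons a t =>
          refine ⟨a, ?_⟩
          cases t with
          | nil => rfl
          | cons b u => simp at h1
      have hx : x = [] := by
        have hx0 : x.length = 0 := by simpa using hw0
        rw [List.eq_nil_iff_length_eq_zero]
        omega
      subst hx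
      rfl
    · have hw : 1 ≤ (grid.headD []).length := by omega
      have hne : grid ≠ [] := by
        intro h
        subst h
        simp at hw
      have hh1 : 1 ≤ grid.length := by
        cases grid with
        | nil => exact absurd rfl hne
        | cons a t => simp
      have hle : grid.length ≤ (grid.headD []).length + 1 := by
        by_contra hgt
        exact hnd ⟨hne, hrect, hw, by omega⟩
      exact transform_eq_alt_of_rect grid hrect hw hh1 hle

theorem transform_changed : Claim_changed_transform := by
  unfold Claim_changed_transform; decide
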